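-- pv_equiv track=rewrite | github.com/babyyu0/Programmers-BOJHub | Python3/프로그래머스/1/155652. 둘만의 암호/둘만의 암호.py | solution
-- ===== SOURCE A (Python) =====
-- def solution(s, skip, index):
--     answer, cur_idx = '', 0
--     skip = [ord(sk) - 97 for sk in skip]
--     s = [ord(c) - 97 for c in s]
--
--     cur_idx = 0
--     for c in s:
--         cur_idx = 0
--         while cur_idx < index:
--             c = (c + 1) % 26
--             cur_idx += int(c not in skip)
--         answer += chr(c + 97)
--
--     return answer
-- ===== SOURCE B (Python) =====
-- def solution(s, skip, index):
--     if index <= 0: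
--         return s
--     allowed = [i for i in range(26) if chr(i + 97) not in skip]
--     m = len(allowed)
--     out = []
--     for ch in s:
--         v = (ord(ch) - 97) % 26
--         k = sum(1 for a in allowed if a <= v)
--         out.append(chr(allowed[(k + index - 1) % m] + 97))
--     return ''.join(out)
-- ===== Notes on version B (the rewrite author's own statement) =====
-- stated objective: faster
-- what changed: Replaces A's per-character stepping while-loop (index counted steps through the alphabet) by a precomputed list of non-skipped letters and a single modular lookup allowed[(k+index-1) % m] per character, where k counts allowed letters <= the character.
import Mathlib
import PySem

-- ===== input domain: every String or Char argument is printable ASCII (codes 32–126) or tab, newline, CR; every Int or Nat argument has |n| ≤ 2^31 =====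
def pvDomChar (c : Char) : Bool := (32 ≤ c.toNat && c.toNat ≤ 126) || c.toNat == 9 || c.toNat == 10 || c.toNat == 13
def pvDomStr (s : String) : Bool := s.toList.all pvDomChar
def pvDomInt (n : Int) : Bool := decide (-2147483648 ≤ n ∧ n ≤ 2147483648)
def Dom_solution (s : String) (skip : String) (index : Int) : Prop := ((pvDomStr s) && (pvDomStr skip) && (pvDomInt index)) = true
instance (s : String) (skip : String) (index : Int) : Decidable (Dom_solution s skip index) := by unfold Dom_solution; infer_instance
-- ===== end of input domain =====

-- B replaces A's per-character stepping while-loop by a table of the non-skipped letters and one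
-- modular lookup per character (objective: faster; return value only, no observable mutation).

-- ===== PORT A =====
-- A's inner 'while cur_idx < index' loop; the fuel argument only makes the loop total
-- (inside Pre_solution it is proved never to run out; A diverges exactly where it would).
def pvLoopA (skipL : List Int) (index : Int) : Nat → Int → Int → Int
  | 0, c, _ => c
  | fuel+1, c, cur =>
    if cur < index then
      let c2 := PySem.Int.mod (c + 1) 26
      pvLoopA skipL index fuel c2 (cur + (if skipL.contains c2 then 0 else 1))
    else c

def solution (s : String) (skip : String) (index : Int) : String :=
  let skipL : List Int := skip.toList.map (fun sk => ((sk.toNat : Int) - 97))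
  let sL : List Int := s.toList.map (fun c => ((c.toNat : Int) - 97))
  let answer : List Char := sL.foldl (fun answer c =>
      answer ++ [Char.ofNat ((pvLoopA skipL index (26 * index.toNat) c 0) + 97).toNat]) []
  String.ofList answer

-- ===== PORT B =====
def solution_alt (s : String) (skip : String) (index : Int) : String :=
  if index ≤ 0 then s
  else
    let allowed : List Int := (PySem.List.pyRange 0 26 1).filter
      (fun i => ! PySem.Str.isIn (String.ofList [Char.ofNat (i + 97).toNat]) skip)
    let m : Int := allowed.length
    let out : List Char := s.toList.foldl (fun out ch =>
      let v : Int := PySem.Int.mod ((ch.toNat : Int) - 97) 26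
      let k : Int := (allowed.filter (fun a => a ≤ v)).length
      out ++ [Char.ofNat (((PySem.List.pyGet? allowed (PySem.Int.mod (k + index - 1) m)).getD 0) + 97).toNat]) []
    String.ofList out

-- ===== PRECONDITION & SPEC =====
-- Pre_ excludes only the inputs where A never returns (the while-loop diverges): a non-empty s
-- with index > 0 while every lowercase letter occurs in skip.
def Pre_solution (s : String) (skip : String) (index : Int) : Prop :=
  s = "" ∨ index ≤ 0 ∨ ∃ i ∈ List.range 26, Char.ofNat (i + 97) ∉ skip.toList
instance (s : String) (skip : String) (index : Int) : Decidable (Pre_solution s skip index) := by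
  unfold Pre_solution; infer_instance

def pvWitness_solution : String × String × Int := ("ab", "b", 2)

def Spec_solution (s : String) (skip : String) (index : Int) (out : String) : Prop := out = solution_alt s skip index
instance (s : String) (skip : String) (index : Int) (out : String) : Decidable (Spec_solution s skip index out) := by unfold Spec_solution; infer_instance

-- ===== CLAIM (what is proved, stated in full; the proofs are below) =====
def Claim_equal_solution : Prop := ∀ (s : String) (skip : String) (index : Int), Dom_solution s skip index → Pre_solution s skip index → Spec_solution s skip index (solution s skip index)

-- ===== LEMMAS AND PROOFS =====

-- q r = "letter r is not skipped"; pvAL q = the allowed residues in order; pvCnt q r = #allowed < r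
def pvQ (skip : String) (r : Nat) : Bool := ! skip.toList.contains (Char.ofNat (r + 97))
def pvAL (q : Nat → Bool) : List Nat := (List.range 26).filter q
def pvCnt (q : Nat → Bool) (r : Nat) : Nat := ((List.range r).filter q).length

lemma pv_toNat_ofNat (n : Nat) (h : n < 55296) : (Char.ofNat n).toNat = n := by
  simp [Char.ofNat, Nat.isValidChar, h]

lemma pv_exit (skipL : List Int) (index : Int) (fuel : Nat) (c cur : Int)
    (h : ¬ cur < index) : pvLoopA skipL index fuel c cur = c := by
  cases fuel <;> simp [pvLoopA, h]

lemma pv_cnt_succ (q : Nat → Bool) (r : Nat) :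
    pvCnt q (r+1) = pvCnt q r + (if q r then 1 else 0) := by
  simp only [pvCnt, List.range_succ, List.filter_append, List.length_append]
  cases h : q r <;> simp [h]

lemma pv_get (q : Nat → Bool) (a : Nat) (ha : a < 26) (hqa : q a = true) :
    (pvAL q)[pvCnt q a]? = some a := by
  have h26 : 26 = (a+1) + (25 - a) := by omega
  rw [pvAL, h26, List.range_add, List.filter_append, List.range_succ, List.filter_append]
  have hsing : List.filter q [a] = [a] := by simp [hqa]
  rw [hsing, List.append_assoc]
  rw [List.getElem?_append_right (by exact le_of_eq rfl)]
  simp [pvCnt]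

lemma pv_cnt_lt (q : Nat → Bool) (a : Nat) (ha : a < 26) (hqa : q a = true) :
    pvCnt q a < (pvAL q).length := by
  have h := pv_get q a ha hqa
  obtain ⟨h1, -⟩ := List.getElem?_eq_some_iff.1 h
  exact h1

lemma pv_K1 (q : Nat → Bool) (c : Int) :
    pvCnt q (((c+1) % 26).toNat + 1) % (pvAL q).length
      = (pvCnt q ((c % 26).toNat + 1) + (if q (((c+1) % 26).toNat) then 1 else 0)) % (pvAL q).length := by
  rcases Nat.lt_or_ge (c % 26).toNat 25 with h | h
  · have h2 : ((c+1) % 26).toNat = (c % 26).toNat + 1 := by omega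
    rw [h2, pv_cnt_succ]
  · have h25 : (c % 26).toNat = 25 := by omega
    have h0 : ((c+1) % 26).toNat = 0 := by omega
    rw [h25, h0]
    have hm : pvCnt q (25 + 1) = (pvAL q).length := rfl
    have hc1 : pvCnt q (0 + 1) = (if q 0 then 1 else 0) := by
      have := pv_cnt_succ q 0
      simpa [pvCnt] using this
    rw [hm, hc1, Nat.add_mod_left]

lemma pv_K2 (q : Nat → Bool) (c : Int) (hq1 : q (((c+1) % 26).toNat) = true) :
    (pvAL q).getD (pvCnt q ((c % 26).toNat + 1) % (pvAL q).length) 0 = ((c+1) % 26).toNat := by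
  rcases Nat.lt_or_ge (c % 26).toNat 25 with h | h
  · have h2 : ((c+1) % 26).toNat = (c % 26).toNat + 1 := by omega
    rw [h2] at hq1 ⊢
    have hlt : pvCnt q ((c % 26).toNat + 1) < (pvAL q).length :=
      pv_cnt_lt q _ (by omega) hq1
    rw [Nat.mod_eq_of_lt hlt, List.getD_eq_getElem?_getD, pv_get q _ (by omega) hq1]
    rfl
  · have h25 : (c % 26).toNat = 25 := by omega
    have h0 : ((c+1) % 26).toNat = 0 := by omega
    rw [h0] at hq1
    rw [h25, h0]
    have hm : pvCnt q (25 + 1) = (pvAL q).length := rfl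
    rw [hm, Nat.mod_self]
    have := pv_get q 0 (by omega) hq1
    have hc0 : pvCnt q 0 = 0 := rfl
    rw [hc0] at this
    rw [List.getD_eq_getElem?_getD, this]
    rfl

lemma pv_chain (q : Nat → Bool) :
    ∀ (g : Nat) (c : Int), (∀ t : Nat, t < g → q (((c + 1 + t) % 26).toNat) = false) →
    pvCnt q (((c + g) % 26).toNat + 1) % (pvAL q).length
      = pvCnt q ((c % 26).toNat + 1) % (pvAL q).length := by
  intro g
  induction g with
  | zero =>
    intro c _
    have h0 : (c + (((0:Nat)):Int)) = c := by push_cast; ring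
    rw [h0]
  | succ g ih =>
    intro c hskip
    have hq0 : q (((c + 1 + (g:Int)) % 26).toNat) = false := hskip g (by omega)
    have hstep := pv_K1 q (c + (g:Int))
    rw [show (c + (g:Int) + 1) = c + 1 + (g:Int) by ring] at hstep
    rw [hq0] at hstep
    norm_num at hstep
    have hcast : (c + ((g+1 : Nat) : Int)) = c + 1 + (g:Int) := by push_cast; ring
    rw [hcast, hstep]
    exact ih c (fun t ht => hskip t (by omega))

lemma pv_one (skipL : List Int) (q : Nat → Bool) (index : Int)
    (hq : ∀ c2 : Int, 0 ≤ c2 → c2 < 26 → skipL.contains c2 = ! q c2.toNat) :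
    ∀ (g : Nat) (c cur : Int) (fuel : Nat), cur < index →
    (∀ t : Nat, t < g → q (((c + 1 + t) % 26).toNat) = false) →
    q (((c + 1 + g) % 26).toNat) = true → g < fuel →
    pvLoopA skipL index fuel c cur
      = pvLoopA skipL index (fuel - (g+1)) ((c + 1 + (g:Int)) % 26) (cur + 1) := by
  have hmod : ∀ x : Int, PySem.Int.mod x 26 = x % 26 :=
    fun x => PySem.Int.mod_eq_emod_of_pos (by norm_num)
  intro g
  induction g with
  | zero =>
    intro c cur fuel hcur _ hland hfuel
    obtain ⟨f, rfl⟩ : ∃ f, fuel = f + 1 := ⟨fuel - 1, by omega⟩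
    have hland' : q (((c+1) % 26).toNat) = true := by
      have : (c + 1 + ((0:Nat):Int)) = c + 1 := by push_cast; ring
      rw [this] at hland; exact hland
    have hcont : skipL.contains ((c+1) % 26) = false := by
      rw [hq _ (by omega) (by omega), hland']; rfl
    simp only [pvLoopA, hmod, hcont, if_pos hcur, if_neg (by simp : ¬ (false = true))]
    have h1 : (c + 1 + ((0:Nat):Int)) % 26 = (c+1) % 26 := by push_cast; ring_nf
    rw [h1]
    norm_num
  | succ g ih =>
    intro c cur fuel hcur hskip hland hfuel
    obtain ⟨f, rfl⟩ : ∃ f, fuel = f + 1 := ⟨fuel - 1, by omega⟩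
    have hq0 : q (((c+1) % 26).toNat) = false := by
      have h := hskip 0 (by omega)
      have he : (c + 1 + ((0:Nat):Int)) = c + 1 := by push_cast; ring
      rw [he] at h; exact h
    have hcont : skipL.contains ((c+1) % 26) = true := by
      rw [hq _ (by omega) (by omega), hq0]; rfl
    simp only [pvLoopA, hmod, hcont, if_pos hcur]
    norm_num
    have hres := ih ((c+1) % 26) cur f hcur
      (fun t ht => by
        have h := hskip (t+1) (by omega)
        have he : ((c+1) % 26 + 1 + (t:Int)) % 26 = (c + 1 + ((t+1 : Nat):Int)) % 26 := by
          push_cast; omega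
        rw [he]; exact h)
      (by
        have he : ((c+1) % 26 + 1 + (g:Int)) % 26 = (c + 1 + ((g+1 : Nat):Int)) % 26 := by
          push_cast; omega
        rw [he]; exact hland)
      (by omega)
    have he2 : ((c+1) % 26 + 1 + (g:Int)) % 26 = (c + 1 + ((g+1 : Nat):Int)) % 26 := by
      push_cast; omega
    rw [hres, he2]
    congr 1
    omega

lemma pv_gap (q : Nat → Bool) (hm : pvAL q ≠ []) (c : Int) :
    ∃ g : Nat, g < 26 ∧ (∀ t : Nat, t < g → q (((c + 1 + t) % 26).toNat) = false) ∧
      q (((c + 1 + g) % 26).toNat) = true := by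
  obtain ⟨r, hr⟩ := List.exists_mem_of_ne_nil _ hm
  have hr' := List.mem_filter.1 hr
  have hr26 : r < 26 := List.mem_range.1 hr'.1
  have hqr : q r = true := hr'.2
  set p : Nat → Bool := fun t => q (((c + 1 + (t:Int)) % 26).toNat) with hp
  have hex : ∃ t ∈ List.range 26, p t = true := by
    refine ⟨(((r:Int) - c - 1) % 26).toNat, List.mem_range.2 (by omega), ?_⟩
    show q (((c + 1 + (((((r:Int) - c - 1) % 26).toNat : Nat) : Int)) % 26).toNat) = true
    have : ((c + 1 + (((((r:Int) - c - 1) % 26).toNat : Nat) : Int)) % 26).toNat = r := by omega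
    rw [this]; exact hqr
  have hglen : (List.range 26).findIdx p < 26 := by
    have := List.findIdx_lt_length.2 hex
    simpa using this
  refine ⟨(List.range 26).findIdx p, hglen, ?_, ?_⟩
  · intro t ht
    have h := List.not_of_lt_findIdx (p := p) (xs := List.range 26) ht
    simpa [List.getElem_range, hp] using h
  · have h := @List.findIdx_getElem _ p (List.range 26) (by simpa using hglen)
    simpa [List.getElem_range, hp] using h

lemma pv_mod_add (a b k m : Nat) (h : a % m = b % m) : (a + k) % m = (b + k) % m := by
  rw [Nat.add_mod a, Nat.add_mod b, h]

lemma pv_main (skipL : List Int) (q : Nat → Bool) (index : Int)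
    (hq : ∀ c2 : Int, 0 ≤ c2 → c2 < 26 → skipL.contains c2 = ! q c2.toNat)
    (hm : pvAL q ≠ []) :
    ∀ (j : Nat) (c cur : Int) (fuel : Nat), cur + ((j:Int)+1) = index → 26 * (j+1) ≤ fuel →
    pvLoopA skipL index fuel c cur
      = (((pvAL q).getD ((pvCnt q ((c % 26).toNat + 1) + j) % (pvAL q).length) 0 : Nat) : Int) := by
  intro j
  induction j with
  | zero =>
    intro c cur fuel hidx hfuel
    have hcur : cur < index := by omega
    obtain ⟨g, hg26, hmin, hpg⟩ := pv_gap q hm c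
    rw [pv_one skipL q index hq g c cur fuel hcur hmin hpg (by omega)]
    rw [pv_exit _ _ _ _ _ (by omega)]
    have hchain := pv_chain q g c hmin
    have hK2 := pv_K2 q (c + (g:Int))
      (by rw [show (c + (g:Int) + 1) = c + 1 + (g:Int) by ring]; exact hpg)
    rw [hchain] at hK2
    rw [Nat.add_zero, hK2]
    rw [show (c + (g:Int) + 1) = c + 1 + (g:Int) by ring]
    omega
  | succ j ih =>
    intro c cur fuel hidx hfuel
    have hcur : cur < index := by omega
    obtain ⟨g, hg26, hmin, hpg⟩ := pv_gap q hm c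
    rw [pv_one skipL q index hq g c cur fuel hcur hmin hpg (by omega)]
    have hrec := ih ((c + 1 + (g:Int)) % 26) (cur + 1) (fuel - (g+1))
      (by push_cast at hidx ⊢; omega) (by omega)
    rw [hrec]
    congr 2
    rw [show ((c + 1 + (g:Int)) % 26 % 26) = ((c + 1 + (g:Int)) % 26) from by omega]
    have hchain := pv_chain q g c hmin
    have hK1 := pv_K1 q (c + (g:Int))
    rw [show (c + (g:Int) + 1) = c + 1 + (g:Int) by ring] at hK1
    rw [hpg] at hK1
    norm_num at hK1
    have h1 : pvCnt q (((c + 1 + (g:Int)) % 26).toNat + 1) % (pvAL q).length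
        = (pvCnt q ((c % 26).toNat + 1) + 1) % (pvAL q).length :=
      hK1.trans (pv_mod_add _ _ 1 _ hchain)
    have h2 := pv_mod_add _ _ j _ h1
    rw [show pvCnt q ((c % 26).toNat + 1) + 1 + j = pvCnt q ((c % 26).toNat + 1) + (j+1) from by omega] at h2
    exact h2

-- bridge: the membership test of A's skip list, for residues 0 ≤ c < 26
lemma pv_hq (skip : String) :
    ∀ c2 : Int, 0 ≤ c2 → c2 < 26 →
      (skip.toList.map (fun sk => ((sk.toNat : Int) - 97))).contains c2 = ! pvQ skip c2.toNat := by
  intro c2 h0 h26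
  have : (skip.toList.map (fun sk => ((sk.toNat : Int) - 97))).contains c2
      = skip.toList.contains (Char.ofNat (c2.toNat + 97)) := by
    rw [Bool.eq_iff_iff]
    simp only [List.contains_iff_mem, List.mem_map]
    constructor
    · rintro ⟨ch, hch, heq⟩
      have hn : ch.toNat = c2.toNat + 97 := by omega
      rw [← hn, Char.ofNat_toNat]; exact hch
    · intro hmem
      refine ⟨Char.ofNat (c2.toNat + 97), hmem, ?_⟩
      rw [pv_toNat_ofNat _ (by omega)]
      omega
  rw [this, pvQ, Bool.not_not]

-- bridge: a one-character needle: 'ch in s' is list membership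
lemma pv_isIn_single (ch : Char) (s : String) :
    PySem.Str.isIn (String.ofList [ch]) s = s.toList.contains ch := by
  rw [Bool.eq_iff_iff, PySem.Str.isIn_iff_infix, List.contains_iff_mem, String.toList_ofList]
  constructor
  · intro h; exact h.subset (by simp)
  · intro h
    obtain ⟨l1, l2, heq⟩ := List.append_of_mem h
    rw [heq]
    exact ⟨l1, l2, by simp⟩

-- bridge: B's allowed list is the list of allowed residues, cast to Int
lemma pv_allowed (skip : String) :
    (PySem.List.pyRange 0 26 1).filter
        (fun i => ! PySem.Str.isIn (String.ofList [Char.ofNat (i + 97).toNat]) skip)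
      = (pvAL (pvQ skip)).map (Nat.cast : Nat → Int) := by
  have h26 : ((26:Int) - 0).toNat = 26 := rfl
  rw [PySem.List.pyRange_one, h26, List.filter_map]
  rw [show (fun k : Nat => (0:Int) + (k:Int)) = (Nat.cast : Nat → Int) by funext k; ring]
  rw [pvAL]
  congr 1
  apply List.filter_congr
  intro k hk
  simp only [Function.comp_apply]
  have h1 : ((k:Int) + 97).toNat = k + 97 := by omega
  rw [h1, pv_isIn_single, pvQ]

-- B's filter '(a <= v)' over the allowed residues is the prefix count
lemma pv_fle (q : Nat → Bool) (v : Nat) (hv : v < 26) :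
    (pvAL q).filter (fun a => decide (a ≤ v)) = (List.range (v+1)).filter q := by
  rw [pvAL, List.filter_filter]
  have h26 : 26 = (v+1) + (25 - v) := by omega
  rw [h26, List.range_add, List.filter_append]
  have h2 : (((List.range (25 - v)).map (fun i => v + 1 + i)).filter
      (fun a => decide (a ≤ v) && q a)) = [] := by
    rw [List.filter_eq_nil_iff]
    intro a ha
    obtain ⟨i, _, rfl⟩ := List.mem_map.1 ha
    simp [Nat.not_le.2 (by omega : v < v + 1 + i)]
  rw [h2, List.append_nil]
  apply List.filter_congr
  intro a ha
  have : a ≤ v := by have := List.mem_range.1 ha; omega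
  simp [this]

-- the whole of A reduced to a per-character map
lemma pv_solutionA_eq (s : String) (skip : String) (index : Int) :
    solution s skip index = String.ofList (s.toList.map (fun ch =>
      Char.ofNat ((pvLoopA (skip.toList.map (fun sk => ((sk.toNat : Int) - 97))) index
        (26 * index.toNat) ((ch.toNat : Int) - 97) 0) + 97).toNat)) := by
  simp only [solution]
  rw [List.foldl_map, PySem.List.foldl_append_singleton_eq_map, List.nil_append]

-- the whole of B reduced to a per-character map (for index > 0)
lemma pv_solutionB_eq (s : String) (skip : String) (index : Int) (hpos : ¬ index ≤ 0) :
    solution_alt s skip index = String.ofList (s.toList.map (fun ch =>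
      let allowed : List Int := (pvAL (pvQ skip)).map (Nat.cast : Nat → Int)
      let v : Int := PySem.Int.mod ((ch.toNat : Int) - 97) 26
      let k : Int := (allowed.filter (fun a => a ≤ v)).length
      Char.ofNat (((PySem.List.pyGet? allowed
        (PySem.Int.mod (k + index - 1) allowed.length)).getD 0) + 97).toNat)) := by
  simp only [solution_alt, if_neg hpos, pv_allowed]
  rw [PySem.List.foldl_append_singleton_eq_map, List.nil_append]

-- per-character agreement: A's stepping loop equals B's modular table lookup
lemma pv_char (skip : String) (index : Int) (hpos : 0 < index)
    (hm : pvAL (pvQ skip) ≠ []) (c0 : Int) :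
    pvLoopA (skip.toList.map (fun sk => ((sk.toNat : Int) - 97))) index (26 * index.toNat) c0 0
      = (PySem.List.pyGet? ((pvAL (pvQ skip)).map (Nat.cast : Nat → Int))
          (PySem.Int.mod (((((pvAL (pvQ skip)).map (Nat.cast : Nat → Int)).filter
              (fun a => a ≤ PySem.Int.mod c0 26)).length : Int) + index - 1)
            ((pvAL (pvQ skip)).map (Nat.cast : Nat → Int)).length)).getD 0 := by
  set q := pvQ skip with hqdef
  have hM : 0 < (pvAL q).length := List.length_pos_iff.2 hm
  -- A side
  have hA := pv_main (skip.toList.map (fun sk => ((sk.toNat : Int) - 97))) q index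
    (pv_hq skip) hm (index.toNat - 1) c0 0 (26 * index.toNat)
    (by omega) (by omega)
  rw [hA]
  -- B side
  have hv : PySem.Int.mod c0 26 = ((((c0 % 26).toNat : Nat)) : Int) := by
    rw [PySem.Int.mod_eq_emod_of_pos (by norm_num)]; omega
  set v : Nat := (c0 % 26).toNat with hvdef
  have hv26 : v < 26 := by omega
  have hfilter : (((pvAL q).map (Nat.cast : Nat → Int)).filter
      (fun a => a ≤ PySem.Int.mod c0 26)) = ((List.range (v+1)).filter q).map (Nat.cast : Nat → Int) := by
    rw [hv, List.filter_map, ← pv_fle q v hv26]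
    congr 1
    apply List.filter_congr
    intro a _
    simp [Function.comp]
  rw [hfilter]
  have hlen1 : (((List.range (v+1)).filter q).map (Nat.cast : Nat → Int)).length = pvCnt q (v+1) := by
    rw [List.length_map]; rfl
  rw [hlen1]
  have hlen2 : ((pvAL q).map (Nat.cast : Nat → Int)).length = (pvAL q).length := List.length_map ..
  rw [hlen2]
  have hmod : PySem.Int.mod ((pvCnt q (v+1) : Int) + index - 1) ((pvAL q).length : Int)
      = (((pvCnt q (v+1) + (index.toNat - 1)) % (pvAL q).length : Nat) : Int) := by
    rw [PySem.Int.mod_eq_emod_of_pos (by exact_mod_cast hM)]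
    have h1 : ((pvCnt q (v+1) : Int) + index - 1) = ((pvCnt q (v+1) + (index.toNat - 1) : Nat) : Int) := by
      omega
    rw [h1]
    norm_cast
  rw [hmod]
  rw [PySem.List.pyGet?_natCast]
  have hidx : (pvCnt q (v+1) + (index.toNat - 1)) % (pvAL q).length < (pvAL q).length :=
    Nat.mod_lt _ hM
  rw [List.getElem?_map]
  rw [List.getElem?_eq_getElem (by rw [pvAL] at hidx ⊢; exact hidx)]
  rw [List.getD_eq_getElem?_getD, List.getElem?_eq_getElem (by exact hidx)]
  rfl

-- ===== VERDICT (by name: the statement is the Claim_ definition above) =====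
theorem solution_spec : Claim_equal_solution := by
  intro s skip index _hDom hPre
  unfold Spec_solution
  by_cases hile : index ≤ 0
  · -- index <= 0: A rebuilds s unchanged, B returns s
    rw [pv_solutionA_eq]
    unfold solution_alt
    rw [if_pos hile]
    have : s.toList.map (fun ch =>
        Char.ofNat ((pvLoopA (skip.toList.map (fun sk => ((sk.toNat : Int) - 97))) index
          (26 * index.toNat) ((ch.toNat : Int) - 97) 0) + 97).toNat) = s.toList.map id := by
      apply List.map_congr_left
      intro ch _
      rw [pv_exit _ _ _ _ _ (by omega)]
      have h1 : (((ch.toNat : Int) - 97) + 97).toNat = ch.toNat := by omega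
      rw [h1, Char.ofNat_toNat, id]
    rw [this, List.map_id]
    simp
  · rw [pv_solutionA_eq, pv_solutionB_eq _ _ _ hile]
    rcases hPre with hs | hle | hex
    · subst hs; rfl
    · omega
    · obtain ⟨i, hi, hnot⟩ := hex
      have hqi : pvQ skip i = true := by
        simp [pvQ, hnot]
      have hm : pvAL (pvQ skip) ≠ [] :=
        List.ne_nil_of_mem (List.mem_filter.2 ⟨hi, hqi⟩)
      congr 1
      apply List.map_congr_left
      intro ch _
      simp only []
      rw [pv_char skip index (by omega) hm]
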